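-- pv_equiv track=rewrite | github.com/aman1108/Interview-Coding-Questions | Binary Search and Hashing/Number of Valid Words for Each Puzzle.py | solve
-- ===== SOURCE A (Python) =====
-- from collections import defaultdict
--
-- def solve(words,puzzles):
--     n=len(words)
--     m=len(puzzles)
--
--     G=[defaultdict(lambda:0) for i in range(26)]
--     for val in words:
--         bitmask=0
--         for i in val:
--             cnt=ord(i)-97
--             bitmask=bitmask|(1<<cnt)
--
--         s=set(val)
--         for j in s:
--             v=ord(j)-97
--             G[v][bitmask]+=1
--
--     ans=[0]*m
--     for j in range(m):
--         val=puzzles[j]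
--         bitmask=0
--         for i in val:
--             cnt=ord(i)-97
--             bitmask=bitmask|(1<<cnt)
--
--         v=ord(val[0])-97
--         original=bitmask
--
--         while(bitmask!=0):
--             ans[j]=ans[j]+G[v][bitmask]
--             bitmask=(bitmask-1)&original
--
--     return ans
-- ===== SOURCE B (Python) =====
-- from collections import Counter
--
-- def solve(words, puzzles):
--     cnt = Counter()
--     for w in words:
--         m = 0
--         for c in w:
--             m |= 1 << (ord(c) - 97)
--         cnt[m] += 1
--     ans = []
--     for p in puzzles:
--         pm = 0
--         for c in p:
--             pm |= 1 << (ord(c) - 97)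
--         first = 1 << (ord(p[0]) - 97)
--         total = 0
--         for wm, c in cnt.items():
--             if (wm & first) != 0 and (wm | pm) == pm:
--                 total += c
--         ans.append(total)
--     return ans
-- ===== Notes on version B (the rewrite author's own statement) =====
-- stated objective: alternative
-- what changed: Replaces the 26 per-first-letter defaultdicts and the per-puzzle 2^k submask enumeration with one Counter of word bitmasks that each puzzle scans directly, testing the first-letter bit and the subset relation on every distinct word mask.
import Mathlib
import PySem

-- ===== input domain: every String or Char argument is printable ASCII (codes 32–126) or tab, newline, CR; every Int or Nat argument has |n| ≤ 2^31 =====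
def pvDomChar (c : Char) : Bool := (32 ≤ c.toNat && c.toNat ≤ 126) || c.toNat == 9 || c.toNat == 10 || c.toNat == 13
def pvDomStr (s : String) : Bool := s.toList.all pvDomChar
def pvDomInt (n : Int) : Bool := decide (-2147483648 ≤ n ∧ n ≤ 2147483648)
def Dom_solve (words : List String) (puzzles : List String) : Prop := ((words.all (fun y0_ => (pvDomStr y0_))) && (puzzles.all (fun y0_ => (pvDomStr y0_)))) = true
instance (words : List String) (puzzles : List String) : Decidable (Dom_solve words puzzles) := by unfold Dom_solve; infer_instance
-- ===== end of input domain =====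

-- B replaces A's 26 per-first-letter defaultdicts and per-puzzle 2^k submask enumeration by one
-- Counter of word bitmasks scanned directly per puzzle (first-letter bit test + subset test).

-- ===== PORT A =====
-- ord(c) - 97; exact on Pre_ (all relevant chars are ≥ 'a', where Python's ord(c)-97 is ≥ 0)
def charBit (c : Char) : Nat := c.toNat - 97

-- bitmask = 0; for i in val: bitmask |= 1 << (ord(i)-97)   (exact on Pre_: Python raises on ord(i) < 97)
def maskOf (cs : List Char) : Nat := cs.foldl (fun bm c => bm ||| (1 <<< charBit c)) 0

-- G[ord(j)-97][bitmask] += 1  (defaultdict: look up with default 0, store back)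
def bumpG (G : List (PySem.Dict Nat Int)) (bm : Nat) (c : Char) : List (PySem.Dict Nat Int) :=
  G.modify (charBit c) (fun d => d.modify bm 0 (· + 1))

-- the first loop of A: G = 26 defaultdicts; for val in words: … for j in set(val): G[ord(j)-97][bitmask] += 1
-- (iterating set(val) in first-occurrence order is sound: the per-character updates hit
-- pairwise different list slots on Pre_, so the result does not depend on the set's order)
def buildG (words : List String) : List (PySem.Dict Nat Int) :=
  words.foldl
    (fun G val =>
      let bm := maskOf val.toList
      (PySem.Set.ofList val.toList).foldl (fun G c => bumpG G bm c) G)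
    (List.replicate 26 PySem.Dict.empty)

-- while bitmask != 0: ans[j] += G[v][bitmask]; bitmask = (bitmask-1) & original
def submaskSum (d : PySem.Dict Nat Int) (orig : Nat) (b : Nat) (acc : Int) : Int :=
  if b = 0 then acc else submaskSum d orig ((b - 1) &&& orig) (acc + d.getD b 0)
  termination_by b
  decreasing_by
    have h : (b - 1) &&& orig ≤ b - 1 := Nat.and_le_left
    omega

def solve (words : List String) (puzzles : List String) : List Int :=
  let G := buildG words
  puzzles.map (fun val =>
    let bm := maskOf val.toList
    -- v = ord(val[0]) - 97; the headD/getD defaults are unreachable on Pre_ (Python raises there)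
    let v := charBit (val.toList.headD 'a')
    submaskSum (G.getD v PySem.Dict.empty) bm bm 0)

-- ===== PORT B =====
def solve_alt (words : List String) (puzzles : List String) : List Int :=
  -- cnt = Counter(); for w in words: cnt[mask(w)] += 1
  let cnt := words.foldl (fun d w => d.modify (maskOf w.toList) 0 (· + 1)) (PySem.Dict.empty : PySem.Dict Nat Int)
  puzzles.map (fun p =>
    let pm := maskOf p.toList
    let first := 1 <<< charBit (p.toList.headD 'a')   -- 1 << (ord(p[0]) - 97)
    cnt.items.foldl (fun t kc => if kc.1 &&& first ≠ 0 ∧ kc.1 ||| pm = pm then t + kc.2 else t) 0)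

-- ===== PRECONDITION & SPEC =====
-- Pre_ excludes exactly the inputs where A raises: a word character outside 'a'..'z'
-- ('1 << negative' is a ValueError below 'a', G[v] an IndexError above 'z'), an empty puzzle
-- (val[0] IndexError), any puzzle character below 'a' ('1 << negative' ValueError), or a
-- puzzle whose FIRST character is above 'z' (G[v] IndexError); non-first puzzle characters
-- above 'z' are fine for A and admitted.
def Pre_solve (words : List String) (puzzles : List String) : Prop :=
  ((words.all fun w => w.toList.all fun c => 97 ≤ c.toNat && c.toNat ≤ 122) &&
   (puzzles.all fun p => !p.toList.isEmpty &&
      (p.toList.all fun c => 97 ≤ c.toNat) &&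
      (p.toList.headD 'a').toNat ≤ 122)) = true
instance (words : List String) (puzzles : List String) : Decidable (Pre_solve words puzzles) := by
  unfold Pre_solve; infer_instance

def pvWitness_solve : List String × List String := (["apple", "pleas", "az"], ["aelwz", "za{"])

def Spec_solve (words : List String) (puzzles : List String) (out : List Int) : Prop := out = solve_alt words puzzles
instance (words : List String) (puzzles : List String) (out : List Int) : Decidable (Spec_solve words puzzles out) := by unfold Spec_solve; infer_instance

-- ===== CLAIM (what is proved, stated in full; the proofs are below) =====
def Claim_equal_solve : Prop := ∀ (words : List String) (puzzles : List String), Dom_solve words puzzles → Pre_solve words puzzles → Spec_solve words puzzles (solve words puzzles)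

-- ===== LEMMAS AND PROOFS =====

theorem land_mod_two (x y : Nat) : (x &&& y) % 2 = x % 2 * (y % 2) := by
  have h1 : (x &&& y) &&& 1 = x &&& (y &&& 1) := by rw [Nat.and_assoc]
  rcases Nat.mod_two_eq_zero_or_one y with h | h
  · have hy : y &&& 1 = 0 := by rw [Nat.and_one_is_mod, h]
    rw [← Nat.and_one_is_mod, h1, hy, Nat.and_zero, h, Nat.mul_zero]
  · have hy : y &&& 1 = 1 := by rw [Nat.and_one_is_mod, h]
    rw [← Nat.and_one_is_mod, h1, hy, Nat.and_one_is_mod, h, Nat.mul_one]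

theorem land_decomp (x y : Nat) : x &&& y = 2 * (x / 2 &&& y / 2) + x % 2 * (y % 2) := by
  conv_lhs => rw [← Nat.div_add_mod (x &&& y) 2]
  rw [Nat.and_div_two, land_mod_two]

theorem submask_step_ge : ∀ b s m : Nat, b &&& m = b → s &&& m = s → s < b →
    s ≤ (b - 1) &&& m := by
  intro b
  induction b using Nat.strong_induction_on with
  | _ b ih =>
    intro s m hb hs hlt
    have hble : b / 2 &&& m / 2 ≤ b / 2 := Nat.and_le_left
    have hsle : s / 2 &&& m / 2 ≤ s / 2 := Nat.and_le_left
    have hbd := land_decomp b m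
    have hsd := land_decomp s m
    have hsm1 : s % 2 * (m % 2) ≤ s % 2 := by
      rcases Nat.mod_two_eq_zero_or_one m with h' | h' <;> simp [h']
    have hbm1 : b % 2 * (m % 2) ≤ b % 2 := by
      rcases Nat.mod_two_eq_zero_or_one m with h' | h' <;> simp [h']
    have hsd2 : s / 2 &&& m / 2 = s / 2 := by omega
    have hsm : s % 2 * (m % 2) = s % 2 := by omega
    have hgoal := land_decomp (b - 1) m
    rcases Nat.mod_two_eq_zero_or_one b with hb2 | hb2
    · -- b even, b > 0
      have hbd2 : b / 2 &&& m / 2 = b / 2 := by omega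
      have hdiv : s / 2 < b / 2 := by omega
      have := ih (b / 2) (by omega) (s / 2) (m / 2) hbd2 hsd2 hdiv
      have hb1div : (b - 1) / 2 = b / 2 - 1 := by omega
      have hb1mod : (b - 1) % 2 = 1 := by omega
      rw [hb1div, hb1mod] at hgoal
      have hsmle : s % 2 ≤ m % 2 := by
        rcases Nat.mod_two_eq_zero_or_one s with h | h
        · omega
        · rw [h, one_mul] at hsm; omega
      omega
    · -- b odd: (b-1) & m = b - 1
      have hb1div : (b - 1) / 2 = b / 2 := by omega
      have hb1mod : (b - 1) % 2 = 0 := by omega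
      rw [hb1div, hb1mod] at hgoal
      have hbd2 : b / 2 &&& m / 2 = b / 2 := by omega
      omega

def subChain (m b : Nat) : List Nat :=
  if b = 0 then [] else b :: subChain m ((b - 1) &&& m)
  termination_by b
  decreasing_by
    have h : (b - 1) &&& m ≤ b - 1 := Nat.and_le_left
    omega

theorem mem_subChain (m : Nat) : ∀ b, b &&& m = b → ∀ s,
    (s ∈ subChain m b ↔ s ≠ 0 ∧ s &&& m = s ∧ s ≤ b) := by
  intro b
  induction b using Nat.strong_induction_on with
  | _ b ih =>
    intro hb s
    rw [subChain]
    by_cases h0 : b = 0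
    · simp [h0]; omega
    · simp only [h0, if_false, List.mem_cons]
      have hb' : ((b - 1) &&& m) &&& m = (b - 1) &&& m := by
        rw [Nat.and_assoc, Nat.and_self]
      have hlt : (b - 1) &&& m < b := by
        have h : (b - 1) &&& m ≤ b - 1 := Nat.and_le_left
        omega
      rw [ih _ hlt hb']
      constructor
      · rintro (rfl | ⟨h1, h2, h3⟩)
        · exact ⟨h0, hb, le_refl _⟩
        · exact ⟨h1, h2, le_trans h3 (le_of_lt hlt)⟩
      · rintro ⟨h1, h2, h3⟩
        rcases eq_or_lt_of_le h3 with rfl | h4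
        · exact Or.inl rfl
        · exact Or.inr ⟨h1, h2, submask_step_ge b s m hb h2 h4⟩

theorem nodup_subChain (m : Nat) : ∀ b, b &&& m = b → (subChain m b).Nodup := by
  intro b
  induction b using Nat.strong_induction_on with
  | _ b ih =>
    intro hb
    rw [subChain]
    by_cases h0 : b = 0
    · simp [h0]
    · simp only [h0, if_false, List.nodup_cons]
      have hb' : ((b - 1) &&& m) &&& m = (b - 1) &&& m := by
        rw [Nat.and_assoc, Nat.and_self]
      have hlt : (b - 1) &&& m < b := by
        have h : (b - 1) &&& m ≤ b - 1 := Nat.and_le_left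
        omega
      refine ⟨fun hmem => ?_, ih _ hlt hb'⟩
      have := (mem_subChain m _ hb' b).mp hmem
      omega

theorem submaskSum_eq (d : PySem.Dict Nat Int) (m : Nat) : ∀ b, ∀ acc,
    submaskSum d m b acc = acc + ((subChain m b).map (fun s => d.getD s 0)).sum := by
  intro b
  induction b using Nat.strong_induction_on with
  | _ b ih =>
    intro acc
    rw [submaskSum, subChain]
    by_cases h0 : b = 0
    · simp [h0]
    · have hlt : (b - 1) &&& m < b := by
        have h : (b - 1) &&& m ≤ b - 1 := Nat.and_le_left
        omega
      simp only [h0, if_false, List.map_cons, List.sum_cons]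
      rw [ih _ hlt]
      ring

theorem testBit_foldl_or (v : Nat) : ∀ (cs : List Char) (a : Nat),
    (cs.foldl (fun bm c => bm ||| (1 <<< charBit c)) a).testBit v
      = (a.testBit v || cs.any (fun c => charBit c == v)) := by
  intro cs
  induction cs with
  | nil => simp
  | cons c cs ih =>
    intro a
    simp only [List.foldl_cons, List.any_cons, ih, Nat.testBit_lor]
    have h1 : (1 <<< charBit c).testBit v = (charBit c == v) := by
      by_cases hcv : charBit c = v
      · subst hcv; simp [Nat.testBit_shiftLeft]
      · rw [Nat.testBit_shiftLeft]
        rcases Nat.lt_or_ge v (charBit c) with h | h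
        · simp [Nat.not_le.mpr h, hcv]
        · have hne : v - charBit c ≠ 0 := by omega
          simp only [ge_iff_le, h, decide_true, Bool.true_and]
          have h2 : Nat.testBit 1 (v - charBit c) = false := by
            rcases Nat.exists_eq_add_of_lt (Nat.pos_of_ne_zero hne) with ⟨k, hk⟩
            rw [(by omega : v - charBit c = k + 1)]
            simp [Nat.testBit_succ]
          simp [h2, hcv]
    rw [h1]
    cases a.testBit v <;> cases (charBit c == v : Bool) <;> simp

theorem testBit_maskOf (cs : List Char) (v : Nat) :
    (maskOf cs).testBit v = cs.any (fun c => charBit c == v) := by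
  rw [maskOf, testBit_foldl_or]; simp

theorem bump_fold_length (bm : Nat) : ∀ (cs : List Char) (G : List (PySem.Dict Nat Int)),
    (cs.foldl (fun G c => bumpG G bm c) G).length = G.length := by
  intro cs
  induction cs with
  | nil => intro G; rfl
  | cons c cs ih => intro G; rw [List.foldl_cons, ih, bumpG, List.length_modify]

theorem getD_modify_list (G : List (PySem.Dict Nat Int)) (i v : Nat) (f : PySem.Dict Nat Int → PySem.Dict Nat Int)
    (hv : v < G.length) :
    (G.modify i f).getD v PySem.Dict.empty = if i = v then f (G.getD v PySem.Dict.empty) else G.getD v PySem.Dict.empty := by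
  have h1 : v < (G.modify i f).length := by rw [List.length_modify]; exact hv
  rw [List.getD_eq_getElem _ _ h1, List.getD_eq_getElem _ _ hv, List.getElem_modify]

theorem bump_fold_getD (bm : Nat) : ∀ (cs : List Char) (G : List (PySem.Dict Nat Int)) (v s : Nat),
    v < G.length →
    ((cs.foldl (fun G c => bumpG G bm c) G).getD v PySem.Dict.empty).getD s 0
      = (G.getD v PySem.Dict.empty).getD s 0
        + if s = bm then (cs.countP (fun c => charBit c == v) : Int) else 0 := by
  intro cs
  induction cs with
  | nil => intro G v s hv; simp
  | cons c cs ih =>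
    intro G v s hv
    rw [List.foldl_cons, ih _ v s (by rw [bumpG, List.length_modify]; exact hv)]
    rw [bumpG, getD_modify_list G (charBit c) v _ hv]
    by_cases hcv : charBit c = v
    · rw [if_pos hcv, PySem.Dict.getD_modify]
      by_cases hsb : s = bm
      · subst hsb
        simp only [List.countP_cons, hcv, beq_self_eq_true]
        push_cast
        ring
      · simp [hsb]
    · rw [if_neg hcv]
      simp [hcv]

theorem countP_nodup_unique {α : Type} (p : α → Bool) : ∀ l : List α, l.Nodup →
    (∀ a ∈ l, ∀ b ∈ l, p a → p b → a = b) →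
    l.countP p = if l.any p then 1 else 0 := by
  intro l
  induction l with
  | nil => simp
  | cons a l ih =>
    intro hnd hu
    rw [List.nodup_cons] at hnd
    rw [List.countP_cons, List.any_cons]
    by_cases hpa : p a
    · have hnone : ∀ b ∈ l, ¬ p b := by
        intro b hb hpb
        exact hnd.1 (hu a (by simp) b (by simp [hb]) hpa hpb ▸ hb)
      have : l.countP p = 0 := by
        rw [List.countP_eq_zero]
        exact hnone
      simp [this, hpa]
    · have : (p a : Bool) = false := by simp [hpa]
      rw [ih hnd.2 (fun x hx y hy => hu x (by simp [hx]) y (by simp [hy]))]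
      simp [this]

theorem buildG_getD (words : List String)
    (hw : ∀ w ∈ words, ∀ c ∈ w.toList, 97 ≤ c.toNat ∧ c.toNat ≤ 122) (v s : Nat) (hv : v < 26) :
    ((buildG words).getD v PySem.Dict.empty).getD s 0
      = (words.countP (fun w => maskOf w.toList == s && (maskOf w.toList).testBit v) : Int) := by
  rw [buildG]
  suffices h : ∀ (L : List String) (G : List (PySem.Dict Nat Int)), G.length = 26 →
      (∀ w ∈ L, ∀ c ∈ w.toList, 97 ≤ c.toNat ∧ c.toNat ≤ 122) →
      ((L.foldl (fun G val =>
          (PySem.Set.ofList val.toList).foldl (fun G c => bumpG G (maskOf val.toList) c) G) G).getD v PySem.Dict.empty).getD s 0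
        = (G.getD v PySem.Dict.empty).getD s 0
          + (L.countP (fun w => maskOf w.toList == s && (maskOf w.toList).testBit v) : Int) by
    have h0 : ((List.replicate 26 PySem.Dict.empty).getD v PySem.Dict.empty) = (PySem.Dict.empty : PySem.Dict Nat Int) := by
      rw [List.getD, List.getElem?_replicate]
      split <;> rfl
    have := h words (List.replicate 26 PySem.Dict.empty) (by simp) hw
    rw [h0, PySem.Dict.getD_empty, zero_add] at this
    exact this
  intro L
  induction L with
  | nil => intro G _ _; simp
  | cons w L ih =>
    intro G hG hwL
    rw [List.foldl_cons, ih _ (by rw [bump_fold_length]; exact hG) (fun x hx => hwL x (by simp [hx]))]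
    rw [bump_fold_getD _ _ _ _ _ (by omega)]
    have hchars : ∀ c ∈ w.toList, 97 ≤ c.toNat ∧ c.toNat ≤ 122 := hwL w (by simp)
    have hset : ((PySem.Set.ofList w.toList).any (fun c => charBit c == v)) = (maskOf w.toList).testBit v := by
      rw [testBit_maskOf, Bool.eq_iff_iff]
      simp only [List.any_eq_true]
      constructor
      · rintro ⟨c, hc, h⟩; exact ⟨c, (PySem.Set.mem_ofList _ _).mp hc, h⟩
      · rintro ⟨c, hc, h⟩; exact ⟨c, (PySem.Set.mem_ofList _ _).mpr hc, h⟩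
    have hcnt : ((PySem.Set.ofList w.toList).countP (fun c => charBit c == v) : Int)
        = if (maskOf w.toList).testBit v then 1 else 0 := by
      rw [countP_nodup_unique _ _ (PySem.Set.nodup_ofList _) ?uniq]
      case uniq =>
        intro a ha b hb hpa hpb
        have ha' := hchars a ((PySem.Set.mem_ofList _ _).mp ha)
        have hb' := hchars b ((PySem.Set.mem_ofList _ _).mp hb)
        have h1 : charBit a = v := by simpa using hpa
        have h2 : charBit b = v := by simpa using hpb
        have hab : a.toNat = b.toNat := by unfold charBit at h1 h2; omega
        exact Char.ext (UInt32.toNat_inj.mp hab)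
      rw [hset]
      split <;> simp
    rw [hcnt]
    by_cases hsb : s = maskOf w.toList
    · subst hsb
      rw [if_pos rfl]
      simp only [List.countP_cons, beq_self_eq_true, Bool.true_and]
      cases htb : (maskOf w.toList).testBit v
      · simp
      · push_cast
        ring
    · rw [if_neg hsb]
      have hbeq : (maskOf w.toList == s) = false := by
        simp [Ne.symm hsb]
      simp only [List.countP_cons, hbeq, Bool.false_and]
      simp

theorem sum_indicator {α : Type} (key : α → Nat) (q : α → Bool) (w : α) :
    ∀ ks : List Nat, ks.Nodup →
    (ks.map (fun k => if key w == k && q w then (1:Int) else 0)).sum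
      = if ks.contains (key w) && q w then 1 else 0 := by
  intro ks
  induction ks with
  | nil => simp
  | cons k ks ih =>
    intro hnd
    rw [List.nodup_cons] at hnd
    rw [List.map_cons, List.sum_cons, ih hnd.2]
    by_cases hk : key w = k
    · subst hk
      have hc : ks.contains (key w) = false := by simp [hnd.1]
      cases hq : q w <;> simp [hnd.1]
    · have h1 : (key w == k) = false := by simp [hk]
      simp [h1, hk]

theorem sum_map_countP {α : Type} (key : α → Nat) (q : α → Bool) :
    ∀ (ks : List Nat), ks.Nodup → ∀ (L : List α),
    (ks.map (fun k => (L.countP (fun w => key w == k && q w) : Int))).sum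
      = (L.countP (fun w => ks.contains (key w) && q w) : Int) := by
  intro ks hnd L
  induction L with
  | nil => simp
  | cons w L ih =>
    simp only [List.countP_cons]
    push_cast
    rw [PySem.List.sum_map_add_int, ih, sum_indicator key q w ks hnd]

theorem foldl_if_add (first pm : Nat) : ∀ (l : List (Nat × Int)) (a : Int),
    l.foldl (fun t kc => if kc.1 &&& first ≠ 0 ∧ kc.1 ||| pm = pm then t + kc.2 else t) a
      = a + (l.map (fun kc => if kc.1 &&& first ≠ 0 ∧ kc.1 ||| pm = pm then kc.2 else 0)).sum := by
  intro l
  induction l with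
  | nil => simp
  | cons kc l ih =>
    intro a
    rw [List.foldl_cons, ih, List.map_cons, List.sum_cons]
    by_cases h : kc.1 &&& first ≠ 0 ∧ kc.1 ||| pm = pm <;> simp [h]
    ring

theorem or_eq_iff_and_eq (m pm : Nat) : (m ||| pm = pm) ↔ (m &&& pm = m) := by
  constructor
  · intro h
    apply Nat.eq_of_testBit_eq
    intro i
    have := congrArg (fun x => x.testBit i) h
    simp only [Nat.testBit_lor] at this
    rw [Nat.testBit_land]
    cases h1 : m.testBit i <;> cases h2 : pm.testBit i <;> simp_all
  · intro h
    apply Nat.eq_of_testBit_eq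
    intro i
    have := congrArg (fun x => x.testBit i) h
    simp only [Nat.testBit_land] at this
    rw [Nat.testBit_lor]
    cases h1 : m.testBit i <;> cases h2 : pm.testBit i <;> simp_all

theorem and_shift_ne_zero (m v : Nat) : (m &&& (1 <<< v) ≠ 0) ↔ m.testBit v = true := by
  rw [Nat.shiftLeft_eq, one_mul, Nat.and_two_pow]
  cases h : m.testBit v <;> simp

-- the per-puzzle equality, assembled
theorem per_puzzle (words : List String)
    (hw : ∀ w ∈ words, ∀ c ∈ w.toList, 97 ≤ c.toNat ∧ c.toNat ≤ 122)
    (p : String) (hfirst : (p.toList.headD 'a').toNat ≤ 122) :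
    submaskSum ((buildG words).getD (charBit (p.toList.headD 'a')) PySem.Dict.empty)
        (maskOf p.toList) (maskOf p.toList) 0
      = (words.foldl (fun d w => d.modify (maskOf w.toList) 0 (· + 1)) (PySem.Dict.empty : PySem.Dict Nat Int)).items.foldl
          (fun t kc => if kc.1 &&& (1 <<< charBit (p.toList.headD 'a')) ≠ 0 ∧ kc.1 ||| maskOf p.toList = maskOf p.toList then t + kc.2 else t) 0 := by
  set v := charBit (p.toList.headD 'a') with hv_def
  set pm := maskOf p.toList with hpm_def
  have hv : v < 26 := by
    rw [hv_def, charBit]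
    omega
  set ms := words.map (fun w => maskOf w.toList) with hms_def
  -- A side
  rw [submaskSum_eq, zero_add]
  have hA1 : (subChain pm pm).map (fun s => ((buildG words).getD v PySem.Dict.empty).getD s 0)
      = (subChain pm pm).map (fun s => (words.countP (fun w => maskOf w.toList == s && (maskOf w.toList).testBit v) : Int)) :=
    List.map_congr_left (fun s _ => buildG_getD words hw v s hv)
  rw [hA1, sum_map_countP (fun w => maskOf w.toList) (fun w => (maskOf w.toList).testBit v)
        (subChain pm pm) (nodup_subChain pm pm (Nat.and_self pm)) words]
  -- B side
  have hcnt : words.foldl (fun d w => d.modify (maskOf w.toList) 0 (· + 1)) (PySem.Dict.empty : PySem.Dict Nat Int)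
      = PySem.Dict.counter ms := by
    rw [PySem.Dict.counter_eq_foldl, hms_def, List.foldl_map]
  rw [hcnt, PySem.Dict.items_counter, foldl_if_add, zero_add, List.map_map]
  have hB1 : ((fun kc : Nat × Int => if kc.1 &&& (1 <<< v) ≠ 0 ∧ kc.1 ||| pm = pm then kc.2 else 0)
        ∘ fun k => (k, (ms.count k : Int)))
      = fun k => if k &&& (1 <<< v) ≠ 0 ∧ k ||| pm = pm then (ms.count k : Int) else 0 := by
    funext k; rfl
  rw [hB1]
  have hB2 : (PySem.Set.ofList ms).map (fun k => if k &&& (1 <<< v) ≠ 0 ∧ k ||| pm = pm then (ms.count k : Int) else 0)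
      = (PySem.Set.ofList ms).map (fun k => (ms.countP (fun x => x == k && decide (x &&& (1 <<< v) ≠ 0 ∧ x ||| pm = pm)) : Int)) := by
    apply List.map_congr_left
    intro k _
    by_cases hP : k &&& (1 <<< v) ≠ 0 ∧ k ||| pm = pm
    · rw [if_pos hP]
      have h : ms.countP (fun x => x == k && decide (x &&& (1 <<< v) ≠ 0 ∧ x ||| pm = pm)) = ms.count k := by
        rw [List.count]
        apply List.countP_congr
        intro x _
        cases hx : (x == k) <;> simp_all
      rw [h]
    · rw [if_neg hP]
      have h : ms.countP (fun x => x == k && decide (x &&& (1 <<< v) ≠ 0 ∧ x ||| pm = pm)) = 0 := by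
        rw [List.countP_eq_zero]
        intro x _
        cases hx : (x == k) <;> simp_all
      rw [h]
      simp
  rw [hB2, sum_map_countP (fun x => x) (fun x => decide (x &&& (1 <<< v) ≠ 0 ∧ x ||| pm = pm))
        (PySem.Set.ofList ms) (PySem.Set.nodup_ofList _) ms]
  have hB3 : ms.countP (fun x => List.contains (PySem.Set.ofList ms) x && decide (x &&& (1 <<< v) ≠ 0 ∧ x ||| pm = pm))
      = ms.countP (fun x => decide (x &&& (1 <<< v) ≠ 0 ∧ x ||| pm = pm)) := by
    apply List.countP_congr
    intro x hx
    have hmem : x ∈ PySem.Set.ofList ms := (PySem.Set.mem_ofList _ _).mpr hx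
    have hc : List.contains (PySem.Set.ofList ms) x = true := by simpa using hmem
    rw [hc, Bool.true_and]
  rw [hB3, hms_def, List.countP_map]
  -- the two countP predicates agree pointwise
  congr 1
  apply List.countP_congr
  intro w _
  suffices h : ((subChain pm pm).contains (maskOf w.toList) && (maskOf w.toList).testBit v)
      = ((fun x => decide (x &&& (1 <<< v) ≠ 0 ∧ x ||| pm = pm)) ∘ (fun w => maskOf w.toList)) w by
    rw [h]
  simp only [Function.comp_apply]
  set m := maskOf w.toList with hm_def
  cases htb : m.testBit v
  · have h1 : ¬ (m &&& (1 <<< v) ≠ 0 ∧ m ||| pm = pm) := by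
      intro h
      rw [(and_shift_ne_zero m v).mp h.1] at htb
      exact absurd htb (by simp)
    simp [h1]
  · have hne0 : m ≠ 0 := by
      intro h0
      rw [h0, Nat.zero_testBit] at htb
      exact absurd htb (by simp)
    have hiff : m ∈ subChain pm pm ↔ (m ||| pm = pm) := by
      rw [mem_subChain pm pm (Nat.and_self pm) m, or_eq_iff_and_eq]
      constructor
      · rintro ⟨_, h2, _⟩; exact h2
      · intro h2
        refine ⟨hne0, h2, ?_⟩
        calc m = m &&& pm := h2.symm
          _ ≤ pm := Nat.and_le_right
    have hand : m &&& (1 <<< v) ≠ 0 := (and_shift_ne_zero m v).mpr htb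
    by_cases hmem : m ∈ subChain pm pm
    · simp [hand, hiff.mp hmem, hmem]
    · have hor : ¬ (m ||| pm = pm) := fun h => hmem (hiff.mpr h)
      simp [hor, hmem]

-- ===== VERDICT (by name: the statement is the Claim_ definition above) =====
theorem solve_spec : Claim_equal_solve := by
  intro words puzzles _hdom hpre
  show solve words puzzles = solve_alt words puzzles
  unfold Pre_solve at hpre
  simp only [Bool.and_eq_true, List.all_eq_true] at hpre
  obtain ⟨hw, hp⟩ := hpre
  have hw' : ∀ w ∈ words, ∀ c ∈ w.toList, 97 ≤ c.toNat ∧ c.toNat ≤ 122 := by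
    intro w hwm c hc
    simpa using hw w hwm c hc
  simp only [solve, solve_alt]
  apply List.map_congr_left
  intro p hpmem
  have hfirst : (p.toList.headD 'a').toNat ≤ 122 := by
    simpa using (hp p hpmem).2
  exact per_puzzle words hw' p hfirst
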